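-- pv_equiv track=rewrite | github.com/eronekogin/leetcode | 2022/find_the_kth_smallest_sum_of_a_matrix_with_sorted_rows.py | kthSmallest
-- ===== SOURCE A (Python) =====
-- from heapq import heappush, heappop
--
-- def kthSmallest(mat: list[list[int]], k: int) -> int:
--     """
--     1. Find the k smallest pair sum between two lists which are sorted in
--         non-decreasing order.
--     2. Then merge each two rows from the matrix until the last one.
--     """
--     def kSmallestPairSums(
--         nums1: list[int],
--         nums2: list[int],
--         k: int
--     ) -> list[list[int]]:
--         sumHeap = []
--         N1, N2 = len(nums1), len(nums2)
--
--         def push(r: int, c: int) -> None: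
--             if r < N1 and c < N2:
--                 heappush(sumHeap, (nums1[r] + nums2[c], r, c))
--
--         pairSums: list[int] = []
--         push(0, 0)
--         while sumHeap and len(pairSums) < k:
--             pariSum, r, c = heappop(sumHeap)
--             pairSums.append(pariSum)
--             push(r, c + 1)
--             if not c:
--                 push(r + 1, c)
--
--         return pairSums
--
--     pairSums = mat[0]
--     for i in range(1, len(mat)):
--         pairSums = kSmallestPairSums(pairSums, mat[i], k)
--
--     return pairSums[-1]
-- ===== SOURCE B (Python) =====
-- def kthSmallest(mat: list[list[int]], k: int) -> int:
--     # Merge rows pairwise, but without a heap: keep a per-row "next column"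
--     # pointer array; rows activate top-down (row r+1 the moment row r first
--     # advances), and each step a linear scan picks the smallest candidate.
--     def kSmallestPairSums(nums1: list[int], nums2: list[int], k: int) -> list[int]:
--         sums: list[int] = []
--         if not nums1 or not nums2:
--             return sums
--         nxt = [0]  # nxt[r] = next column of row r; only activated rows are listed
--         while len(sums) < k:
--             best = None
--             for r, c in enumerate(nxt):
--                 if c < len(nums2):
--                     cand = (nums1[r] + nums2[c], r, c)
--                     if best is None or cand < best:
--                         best = cand
--             if best is None:
--                 break
--             s, r, c = best
--             sums.append(s)
--             nxt[r] = c + 1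
--             if c == 0 and r + 1 < len(nums1):
--                 nxt.append(0)
--         return sums
--
--     pairSums = mat[0]
--     for i in range(1, len(mat)):
--         pairSums = kSmallestPairSums(pairSums, mat[i], k)
--     return pairSums[-1]
-- ===== Notes on version B (the rewrite author's own statement) =====
-- stated objective: alternative
-- what changed: Each row merge drops the heap of candidate (sum,r,c) triples with its push/pop bookkeeping and instead keeps a per-row next-column pointer array, activating rows top-down and picking the smallest candidate by a linear scan each step.
import Mathlib
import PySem

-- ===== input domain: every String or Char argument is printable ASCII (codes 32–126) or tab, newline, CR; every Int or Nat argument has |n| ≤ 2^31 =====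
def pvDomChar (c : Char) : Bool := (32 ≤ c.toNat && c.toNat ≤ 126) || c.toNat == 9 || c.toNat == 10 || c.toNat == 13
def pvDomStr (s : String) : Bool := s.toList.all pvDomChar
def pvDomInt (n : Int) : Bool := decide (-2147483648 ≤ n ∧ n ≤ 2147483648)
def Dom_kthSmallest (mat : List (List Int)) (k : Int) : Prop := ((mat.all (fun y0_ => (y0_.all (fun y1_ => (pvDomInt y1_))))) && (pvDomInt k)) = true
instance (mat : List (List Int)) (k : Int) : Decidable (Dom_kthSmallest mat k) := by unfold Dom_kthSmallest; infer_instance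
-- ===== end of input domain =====

-- B replaces A's heap of candidate triples inside each row merge by a per-row
-- next-column pointer array with a linear minimum scan (alternative structure,
-- same results on every input where A returns).

-- ===== PORT A =====
-- model of heapq on tuples (sum, r, c): the heap is kept as a list ordered by
-- Python's lexicographic tuple order; heappush = ordered insert, heappop = head.
def pvTle (a b : Int × Int × Int) : Bool :=
  decide (a.1 < b.1) || (decide (a.1 = b.1) &&
    (decide (a.2.1 < b.2.1) || (decide (a.2.1 = b.2.1) && decide (a.2.2 ≤ b.2.2))))

def pvHpush (x : Int × Int × Int) : List (Int × Int × Int) → List (Int × Int × Int)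
  | [] => [x]
  | y :: t => if pvTle x y then x :: y :: t else y :: pvHpush x t

-- `push(r, c)` of A: bounds guard, then heappush of (nums1[r] + nums2[c], r, c)
def kspsPush (n1 n2 : List Int) (h : List (Int × Int × Int)) (r c : Int) :
    List (Int × Int × Int) :=
  if r < (n1.length : Int) ∧ c < (n2.length : Int) then
    pvHpush (PySem.List.pyGetD n1 r 0 + PySem.List.pyGetD n2 c 0, r, c) h
  else h

-- the while loop; fuel = k - len(pairSums), so `fuel = 0` ↔ `len(pairSums) < k` fails
def kspsLoop (n1 n2 : List Int) : Nat → List (Int × Int × Int) → List Int → List Int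
  | 0, _, acc => acc
  | _ + 1, [], acc => acc
  | fuel + 1, (s, r, c) :: h, acc =>
      let acc' := acc ++ [s]
      let h1 := kspsPush n1 n2 h r (c + 1)
      let h2 := if c = 0 then kspsPush n1 n2 h1 (r + 1) c else h1
      kspsLoop n1 n2 fuel h2 acc'

def kSmallestPairSums (n1 n2 : List Int) (k : Int) : List Int :=
  kspsLoop n1 n2 k.toNat (kspsPush n1 n2 [] 0 0) []

def kthSmallest (mat : List (List Int)) (k : Int) : Int :=
  let pairSums := (mat.drop 1).foldl (fun ps row => kSmallestPairSums ps row k) (mat.headD [])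
  (PySem.List.pyGet? pairSums (-1)).getD 0

-- ===== PORT B =====
-- strict lexicographic `<` on Python tuples (cand < best)
def pvTlt (a b : Int × Int × Int) : Bool :=
  decide (a.1 < b.1) || (decide (a.1 = b.1) &&
    (decide (a.2.1 < b.2.1) || (decide (a.2.1 = b.2.1) && decide (a.2.2 < b.2.2))))

-- body of B's `for r, c in enumerate(nxt)` scan
def altStep (n1 n2 : List Int) (best : Option (Int × Int × Int)) (rc : Int × Int) :
    Option (Int × Int × Int) :=
  if rc.2 < (n2.length : Int) then
    let cand := (PySem.List.pyGetD n1 rc.1 0 + PySem.List.pyGetD n2 rc.2 0, rc.1, rc.2)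
    match best with
    | none => some cand
    | some b => if pvTlt cand b then some cand else some b
  else best

def altBest (n1 n2 : List Int) (nxt : List Int) : Option (Int × Int × Int) :=
  (PySem.List.enumerate nxt 0).foldl (altStep n1 n2) none

-- B's while loop; fuel = k - len(sums)
def altLoop (n1 n2 : List Int) : Nat → List Int → List Int → List Int
  | 0, _, sums => sums
  | fuel + 1, nxt, sums =>
      match altBest n1 n2 nxt with
      | none => sums
      | some (s, r, c) =>
          let nxt' := PySem.List.pySetD nxt r (c + 1)
          let nxt'' := if c = 0 ∧ r + 1 < (n1.length : Int) then nxt' ++ [0] else nxt'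
          altLoop n1 n2 fuel nxt'' (sums ++ [s])

def altKsps (n1 n2 : List Int) (k : Int) : List Int :=
  if n1 = [] ∨ n2 = [] then [] else altLoop n1 n2 k.toNat [0] []

def kthSmallest_alt (mat : List (List Int)) (k : Int) : Int :=
  let pairSums := (mat.drop 1).foldl (fun ps row => altKsps ps row k) (mat.headD [])
  (PySem.List.pyGet? pairSums (-1)).getD 0

-- ===== PRECONDITION & SPEC =====
-- Pre_ excludes exactly the inputs on which Python A raises: an empty matrix, an
-- empty row, or k < 1 with more than one row (each makes pairSums[-1] an IndexError).
def Pre_kthSmallest (mat : List (List Int)) (k : Int) : Prop :=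
  mat ≠ [] ∧ (∀ r ∈ mat, r ≠ []) ∧ (mat.length = 1 ∨ 1 ≤ k)
instance (mat : List (List Int)) (k : Int) : Decidable (Pre_kthSmallest mat k) := by
  unfold Pre_kthSmallest; infer_instance

def pvWitness_kthSmallest : List (List Int) × Int := ([[5, 1, 3], [4, 2]], 3)

def Spec_kthSmallest (mat : List (List Int)) (k : Int) (out : Int) : Prop := out = kthSmallest_alt mat k
instance (mat : List (List Int)) (k : Int) (out : Int) : Decidable (Spec_kthSmallest mat k out) := by unfold Spec_kthSmallest; infer_instance

-- ===== CLAIM (what is proved, stated in full; the proofs are below) =====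
def Claim_equal_kthSmallest : Prop := ∀ (mat : List (List Int)) (k : Int), Dom_kthSmallest mat k → Pre_kthSmallest mat k → Spec_kthSmallest mat k (kthSmallest mat k)

-- ===== LEMMAS AND PROOFS =====

-- ---- order lemmas for the two tuple comparison functions ----

theorem pvTle_refl (a : Int × Int × Int) : pvTle a a = true := by
  rcases a with ⟨s, r, c⟩; simp [pvTle]

theorem pvTle_trans (a b c : Int × Int × Int) (h1 : pvTle a b = true)
    (h2 : pvTle b c = true) : pvTle a c = true := by
  rcases a with ⟨s1, r1, c1⟩; rcases b with ⟨s2, r2, c2⟩; rcases c with ⟨s3, r3, c3⟩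
  simp [pvTle] at *; omega

theorem pvTle_total (a b : Int × Int × Int) : pvTle a b = true ∨ pvTle b a = true := by
  rcases a with ⟨s1, r1, c1⟩; rcases b with ⟨s2, r2, c2⟩
  simp [pvTle]; omega

theorem pvTle_antisymm (a b : Int × Int × Int) (h1 : pvTle a b = true)
    (h2 : pvTle b a = true) : a = b := by
  rcases a with ⟨s1, r1, c1⟩; rcases b with ⟨s2, r2, c2⟩
  simp [pvTle] at *; omega

theorem pvTlt_iff (a b : Int × Int × Int) : pvTlt a b = true ↔ ¬ pvTle b a = true := by
  rcases a with ⟨s1, r1, c1⟩; rcases b with ⟨s2, r2, c2⟩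
  simp [pvTlt, pvTle]; omega

-- ---- heap (ordered-insert) lemmas ----

theorem pvHpush_perm (x : Int × Int × Int) (h : List (Int × Int × Int)) :
    (pvHpush x h).Perm (x :: h) := by
  induction h with
  | nil => simp [pvHpush]
  | cons y t ih =>
    simp only [pvHpush]
    split
    · exact List.Perm.refl _
    · exact (List.Perm.cons y ih).trans (List.Perm.swap x y t)

theorem pvHpush_pairwise (x : Int × Int × Int) (h : List (Int × Int × Int))
    (hs : h.Pairwise (fun a b => pvTle a b = true)) :
    (pvHpush x h).Pairwise (fun a b => pvTle a b = true) := by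
  induction h with
  | nil => simp [pvHpush]
  | cons y t ih =>
    rw [List.pairwise_cons] at hs
    simp only [pvHpush]
    split
    · rename_i hxy
      refine List.pairwise_cons.mpr ⟨?_, List.pairwise_cons.mpr hs⟩
      intro z hz
      rcases List.mem_cons.mp hz with rfl | hz
      · exact hxy
      · exact pvTle_trans _ _ _ hxy (hs.1 z hz)
    · rename_i hxy
      have hyx : pvTle y x = true := by
        rcases pvTle_total x y with h' | h'
        · exact absurd h' hxy
        · exact h'
      refine List.pairwise_cons.mpr ⟨?_, ih hs.2⟩
      intro z hz
      rcases List.mem_cons.mp (((pvHpush_perm x t).mem_iff).mp hz) with h | h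
      · exact h ▸ hyx
      · exact hs.1 z h

theorem kspsPush_perm (n1 n2 : List Int) (h : List (Int × Int × Int)) (r c : Int) :
    (kspsPush n1 n2 h r c).Perm
      ((if r < (n1.length : Int) ∧ c < (n2.length : Int) then
          [(PySem.List.pyGetD n1 r 0 + PySem.List.pyGetD n2 c 0, r, c)] else []) ++ h) := by
  unfold kspsPush
  split
  · exact pvHpush_perm _ h
  · exact List.Perm.refl _

theorem kspsPush_pairwise (n1 n2 : List Int) (h : List (Int × Int × Int)) (r c : Int)
    (hs : h.Pairwise (fun a b => pvTle a b = true)) :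
    (kspsPush n1 n2 h r c).Pairwise (fun a b => pvTle a b = true) := by
  unfold kspsPush
  split
  · exact pvHpush_pairwise _ h hs
  · exact hs

-- ---- the candidate list described by a pointer state ----

def pvCand (n1 n2 : List Int) (r : Nat) (c : Int) : Int × Int × Int :=
  (PySem.List.pyGetD n1 (r : Int) 0 + PySem.List.pyGetD n2 c 0, (r : Int), c)

def pvCgen (n1 n2 nxt : List Int) (r : Nat) : Option (Int × Int × Int) :=
  if PySem.List.pyGetD nxt (r : Int) 0 < (n2.length : Int) then
    some (pvCand n1 n2 r (PySem.List.pyGetD nxt (r : Int) 0))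
  else none

def pvCands (n1 n2 nxt : List Int) : List (Int × Int × Int) :=
  (List.range nxt.length).filterMap (pvCgen n1 n2 nxt)

-- well-formed pointer state: fits in n1, entries in [0, len n2], only the last row
-- may still be at column 0
def pvWF (n1 n2 nxt : List Int) : Prop :=
  nxt.length ≤ n1.length ∧
  (∀ i : Nat, i < nxt.length →
    0 ≤ PySem.List.pyGetD nxt (i : Int) 0 ∧ PySem.List.pyGetD nxt (i : Int) 0 ≤ (n2.length : Int)) ∧
  (∀ i : Nat, i + 1 < nxt.length → 1 ≤ PySem.List.pyGetD nxt (i : Int) 0)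

theorem mem_pvCands (n1 n2 nxt : List Int) (u : Int × Int × Int) :
    u ∈ pvCands n1 n2 nxt ↔ ∃ r : Nat, r < nxt.length ∧
      PySem.List.pyGetD nxt (r : Int) 0 < (n2.length : Int) ∧
      u = pvCand n1 n2 r (PySem.List.pyGetD nxt (r : Int) 0) := by
  simp only [pvCands, List.mem_filterMap, List.mem_range, pvCgen]
  constructor
  · rintro ⟨r, hr, hg⟩
    split at hg
    · rename_i hlt; exact ⟨r, hr, hlt, (Option.some_inj.mp hg).symm⟩
    · exact absurd hg (by simp)
  · rintro ⟨r, hr, hlt, rfl⟩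
    exact ⟨r, hr, by rw [if_pos hlt]⟩

-- ---- B's scan computes the minimum candidate ----

def pvMinStep (b : Option (Int × Int × Int)) (x : Int × Int × Int) :
    Option (Int × Int × Int) :=
  match b with
  | none => some x
  | some v => if pvTlt x v then some x else some v

theorem altStep_eq (n1 n2 : List Int) (acc : Option (Int × Int × Int)) (r : Nat) (c : Int) :
    altStep n1 n2 acc ((r : Int), c) =
      if c < (n2.length : Int) then pvMinStep acc (pvCand n1 n2 r c) else acc := by
  cases acc <;> rfl

theorem fold_altStep_filterMap (n1 n2 nxt : List Int) :
    ∀ (l : List Nat) (acc : Option (Int × Int × Int)),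
      l.foldl (fun acc (r : Nat) =>
          altStep n1 n2 acc ((Nat.cast r : Int), PySem.List.pyGetD nxt (Nat.cast r) 0)) acc =
        (l.filterMap (pvCgen n1 n2 nxt)).foldl pvMinStep acc := by
  intro l
  induction l with
  | nil => intro acc; rfl
  | cons r t ih =>
    intro acc
    simp only [List.foldl_cons, List.filterMap_cons, altStep_eq, pvCgen]
    split
    · simp only [List.foldl_cons]; exact ih _
    · exact ih _

theorem altBest_eq_minfold (n1 n2 nxt : List Int) :
    altBest n1 n2 nxt = (pvCands n1 n2 nxt).foldl pvMinStep none := by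
  unfold altBest pvCands
  rw [PySem.List.enumerate_eq_map_pyRange nxt 0, PySem.List.len_eq,
    PySem.List.pyRange_zero_natCast, List.map_map, List.foldl_map]
  exact fold_altStep_filterMap n1 n2 nxt (List.range nxt.length) none

theorem foldl_minStep_some (l : List (Int × Int × Int)) :
    ∀ b : Int × Int × Int, ∃ m, l.foldl pvMinStep (some b) = some m ∧
      (m = b ∨ m ∈ l) ∧ pvTle m b = true ∧ ∀ x ∈ l, pvTle m x = true := by
  induction l with
  | nil => intro b; exact ⟨b, rfl, Or.inl rfl, pvTle_refl b, by simp⟩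
  | cons y t ih =>
    intro b
    show ∃ m, t.foldl pvMinStep (pvMinStep (some b) y) = some m ∧ _
    rw [show pvMinStep (some b) y = if pvTlt y b then some y else some b from rfl]
    split
    · rename_i hlt
      obtain ⟨m, hm, hmem, hmb, hall⟩ := ih y
      rw [pvTlt_iff] at hlt
      have hyb : pvTle y b = true := by
        rcases pvTle_total y b with h | h
        · exact h
        · exact absurd h hlt
      refine ⟨m, hm, ?_, pvTle_trans _ _ _ hmb hyb, ?_⟩
      · rcases hmem with rfl | h
        · exact Or.inr (List.mem_cons_self)
        · exact Or.inr (List.mem_cons_of_mem _ h)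
      · intro x hx
        rcases List.mem_cons.mp hx with rfl | hx
        · exact hmb
        · exact hall x hx
    · rename_i hlt
      have hby : pvTle b y = true := by
        rw [pvTlt_iff, not_not] at hlt; exact hlt
      obtain ⟨m, hm, hmem, hmb, hall⟩ := ih b
      refine ⟨m, hm, ?_, hmb, ?_⟩
      · rcases hmem with rfl | h
        · exact Or.inl rfl
        · exact Or.inr (List.mem_cons_of_mem _ h)
      · intro x hx
        rcases List.mem_cons.mp hx with rfl | hx
        · exact pvTle_trans _ _ _ hmb hby
        · exact hall x hx

theorem foldl_minStep_char (l : List (Int × Int × Int)) :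
    (l = [] ∧ l.foldl pvMinStep none = none) ∨
    ∃ m, l.foldl pvMinStep none = some m ∧ m ∈ l ∧ ∀ x ∈ l, pvTle m x = true := by
  rcases l with _ | ⟨y, t⟩
  · exact Or.inl ⟨rfl, rfl⟩
  · right
    obtain ⟨m, hm, hmem, hmb, hall⟩ := foldl_minStep_some t y
    refine ⟨m, hm, ?_, ?_⟩
    · rcases hmem with rfl | h
      · exact List.mem_cons_self
      · exact List.mem_cons_of_mem _ h
    · intro x hx
      rcases List.mem_cons.mp hx with rfl | hx
      · exact hmb
      · exact hall x hx

-- ---- candidate-list update when the minimum (r, c) is consumed ----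

theorem pvRange_split (n r : Nat) (hr : r < n) :
    List.range n = List.range r ++ r :: (List.range (n - r - 1)).map (fun j => r + 1 + j) := by
  induction n with
  | zero => omega
  | succ m ih =>
    rcases Nat.lt_or_ge r m with h | h
    · have h1 : m + 1 - r - 1 = (m - r - 1) + 1 := by omega
      rw [List.range_succ, ih h, h1, List.range_succ, List.map_append]
      simp [show r + 1 + (m - r - 1) = m from by omega, List.append_assoc]
    · have hrm : r = m := by omega
      subst hrm
      rw [List.range_succ]
      simp

theorem filterMap_range_split {β : Type} (g : Nat → Option β) (n r : Nat) (hr : r < n) :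
    (List.range n).filterMap g = (List.range r).filterMap g ++ ((g r).toList ++
      (List.range (n - r - 1)).filterMap (fun j => g (r + 1 + j))) := by
  rw [pvRange_split n r hr, List.filterMap_append]
  congr 1
  rw [List.filterMap_cons]
  cases hg : g r with
  | none => simp [List.filterMap_map]
  | some y => simp [List.filterMap_map]

theorem pvCands_update (n1 n2 nxt : List Int) (r : Nat) (hr : r < nxt.length)
    (hc : PySem.List.pyGetD nxt (r : Int) 0 < (n2.length : Int)) :
    (pvCands n1 n2 (PySem.List.pySetD nxt (r : Int) (PySem.List.pyGetD nxt (r : Int) 0 + 1))).Perm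
      ((if PySem.List.pyGetD nxt (r : Int) 0 + 1 < (n2.length : Int) then
          [pvCand n1 n2 r (PySem.List.pyGetD nxt (r : Int) 0 + 1)] else []) ++
        (pvCands n1 n2 nxt).erase (pvCand n1 n2 r (PySem.List.pyGetD nxt (r : Int) 0))) := by
  set c := PySem.List.pyGetD nxt (r : Int) 0 with hcdef
  set nxt' := PySem.List.pySetD nxt (r : Int) (c + 1) with hndef
  have hlen' : nxt'.length = nxt.length := PySem.List.length_pySetD nxt _ _
  have hget_r : PySem.List.pyGetD nxt' (r : Int) 0 = c + 1 := by
    rw [hndef, PySem.List.pyGetD_pySetD_natCast nxt r r _ _ hr, if_pos rfl]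
  have hget_ne : ∀ i : Nat, i ≠ r →
      PySem.List.pyGetD nxt' (i : Int) 0 = PySem.List.pyGetD nxt (i : Int) 0 := by
    intro i hi
    rw [hndef, PySem.List.pyGetD_pySetD_natCast nxt r i _ _ hr, if_neg hi]
  have hg_ne : ∀ i : Nat, i ≠ r → pvCgen n1 n2 nxt' i = pvCgen n1 n2 nxt i := by
    intro i hi
    unfold pvCgen
    rw [hget_ne i hi]
  have hsplit := filterMap_range_split (pvCgen n1 n2 nxt) nxt.length r hr
  have hsplit' := filterMap_range_split (pvCgen n1 n2 nxt') nxt.length r hr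
  have hX : (List.range r).filterMap (pvCgen n1 n2 nxt') =
      (List.range r).filterMap (pvCgen n1 n2 nxt) := by
    apply List.filterMap_congr
    intro i hi
    rw [List.mem_range] at hi
    exact hg_ne i (by omega)
  have hY : (List.range (nxt.length - r - 1)).filterMap (fun j => pvCgen n1 n2 nxt' (r + 1 + j)) =
      (List.range (nxt.length - r - 1)).filterMap (fun j => pvCgen n1 n2 nxt (r + 1 + j)) := by
    apply List.filterMap_congr
    intro j _
    exact hg_ne (r + 1 + j) (by omega)
  have hgr : pvCgen n1 n2 nxt r = some (pvCand n1 n2 r c) := by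
    unfold pvCgen
    rw [← hcdef, if_pos hc]
  have hgr' : pvCgen n1 n2 nxt' r =
      if c + 1 < (n2.length : Int) then some (pvCand n1 n2 r (c + 1)) else none := by
    unfold pvCgen
    rw [hget_r]
  have herase : ((List.range r).filterMap (pvCgen n1 n2 nxt) ++ ((pvCgen n1 n2 nxt r).toList ++
      (List.range (nxt.length - r - 1)).filterMap (fun j => pvCgen n1 n2 nxt (r + 1 + j)))).erase
        (pvCand n1 n2 r c) =
      (List.range r).filterMap (pvCgen n1 n2 nxt) ++
        (List.range (nxt.length - r - 1)).filterMap (fun j => pvCgen n1 n2 nxt (r + 1 + j)) := by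
    rw [List.erase_append_right _ ?hnotX]
    case hnotX =>
      intro hmem
      rw [List.mem_filterMap] at hmem
      obtain ⟨i, hi, hgi⟩ := hmem
      rw [List.mem_range] at hi
      unfold pvCgen at hgi
      split at hgi
      · have := Option.some_inj.mp hgi
        have : ((i : Int)) = (r : Int) := congrArg (fun t => t.2.1) this
        have : i = r := by exact_mod_cast this
        omega
      · exact absurd hgi (by simp)
    rw [hgr]
    simp only [Option.toList_some, List.singleton_append, List.erase_cons_head]
  show (pvCands n1 n2 nxt').Perm _
  rw [pvCands, hlen', hsplit', hX, hY, hgr']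
  rw [pvCands, hsplit, herase]
  rcases Int.lt_or_le (c + 1) (n2.length : Int) with hlt | hge
  · rw [if_pos hlt, if_pos hlt]
    simp only [Option.toList_some]
    rw [← List.append_assoc, ← List.append_assoc]
    exact (List.perm_append_comm).append_right _
  · rw [if_neg (by omega), if_neg (by omega)]
    simp

theorem pyGetD_append_lt (nxt : List Int) (x : Int) (i : Nat) (hi : i < nxt.length) :
    PySem.List.pyGetD (nxt ++ [x]) (i : Int) 0 = PySem.List.pyGetD nxt (i : Int) 0 := by
  simp only [PySem.List.pyGetD_natCast, List.getD]
  rw [List.getElem?_append_left hi]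

theorem pyGetD_append_last (nxt : List Int) (x : Int) :
    PySem.List.pyGetD (nxt ++ [x]) (nxt.length : Int) 0 = x := by
  simp only [PySem.List.pyGetD_natCast, List.getD]
  rw [List.getElem?_concat_length]
  rfl

theorem pvCands_append (n1 n2 nxt : List Int) (h2 : 0 < n2.length) :
    pvCands n1 n2 (nxt ++ [0]) = pvCands n1 n2 nxt ++ [pvCand n1 n2 nxt.length 0] := by
  unfold pvCands
  rw [List.length_append, List.length_singleton, List.range_succ, List.filterMap_append]
  congr 1
  · apply List.filterMap_congr
    intro i hi
    rw [List.mem_range] at hi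
    unfold pvCgen
    rw [pyGetD_append_lt nxt 0 i hi]
  · unfold pvCgen
    rw [List.filterMap_cons, List.filterMap_nil]
    rw [pyGetD_append_last nxt 0]
    rw [if_pos (by exact_mod_cast h2 : (0:Int) < (n2.length : Int))]

-- ---- the two loops agree ----

theorem altLoop_none (n1 n2 nxt sums : List Int) (fuel : Nat)
    (h : altBest n1 n2 nxt = none) :
    altLoop n1 n2 (fuel + 1) nxt sums = sums := by
  rw [show altLoop n1 n2 (fuel + 1) nxt sums =
    (match altBest n1 n2 nxt with
     | none => sums
     | some (s, r, c) =>
        altLoop n1 n2 fuel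
          (if c = 0 ∧ r + 1 < (n1.length : Int) then
            PySem.List.pySetD nxt r (c + 1) ++ [0] else PySem.List.pySetD nxt r (c + 1))
          (sums ++ [s])) from rfl, h]

theorem altLoop_step (n1 n2 nxt sums : List Int) (fuel : Nat) (s r c : Int)
    (h : altBest n1 n2 nxt = some (s, r, c)) :
    altLoop n1 n2 (fuel + 1) nxt sums =
      altLoop n1 n2 fuel
        (if c = 0 ∧ r + 1 < (n1.length : Int) then
          PySem.List.pySetD nxt r (c + 1) ++ [0] else PySem.List.pySetD nxt r (c + 1))
        (sums ++ [s]) := by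
  rw [show altLoop n1 n2 (fuel + 1) nxt sums =
    (match altBest n1 n2 nxt with
     | none => sums
     | some (s, r, c) =>
        altLoop n1 n2 fuel
          (if c = 0 ∧ r + 1 < (n1.length : Int) then
            PySem.List.pySetD nxt r (c + 1) ++ [0] else PySem.List.pySetD nxt r (c + 1))
          (sums ++ [s])) from rfl, h]

-- well-formedness is preserved by one step
theorem pvWF_step (n1 n2 nxt : List Int) (r : Nat) (hr : r < nxt.length)
    (hwf : pvWF n1 n2 nxt) (hc : PySem.List.pyGetD nxt (r : Int) 0 < (n2.length : Int)) :
    pvWF n1 n2 (PySem.List.pySetD nxt (r : Int) (PySem.List.pyGetD nxt (r : Int) 0 + 1)) := by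
  obtain ⟨hwf1, hwf2, hwf3⟩ := hwf
  have hlen : (PySem.List.pySetD nxt (r : Int) (PySem.List.pyGetD nxt (r : Int) 0 + 1)).length =
      nxt.length := PySem.List.length_pySetD nxt _ _
  have hget : ∀ i : Nat,
      PySem.List.pyGetD (PySem.List.pySetD nxt (r : Int) (PySem.List.pyGetD nxt (r : Int) 0 + 1)) (i : Int) 0 =
        if i = r then PySem.List.pyGetD nxt (r : Int) 0 + 1 else PySem.List.pyGetD nxt (i : Int) 0 :=
    fun i => PySem.List.pyGetD_pySetD_natCast nxt r i _ _ hr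
  refine ⟨by omega, ?_, ?_⟩
  · intro i hi
    rw [hget i]
    split
    · constructor
      · have := (hwf2 r hr).1; omega
      · omega
    · exact hwf2 i (by omega)
  · intro i hi
    rw [hget i]
    split
    · have := (hwf2 r hr).1; omega
    · exact hwf3 i (by omega)

theorem loops_eq (n1 n2 : List Int) :
    ∀ (fuel : Nat) (nxt : List Int) (heap : List (Int × Int × Int)) (sums : List Int),
      heap.Perm (pvCands n1 n2 nxt) → heap.Pairwise (fun a b => pvTle a b = true) →
      pvWF n1 n2 nxt →
      kspsLoop n1 n2 fuel heap sums = altLoop n1 n2 fuel nxt sums := by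
  intro fuel
  induction fuel with
  | zero => intro nxt heap sums _ _ _; rfl
  | succ fuel ih =>
    intro nxt heap sums hperm hsort hwf
    rcases foldl_minStep_char (pvCands n1 n2 nxt) with ⟨hnil, hfold⟩ | ⟨m, hfold, hmem, hmin⟩
    · have hheap : heap = [] := by rw [hnil] at hperm; exact hperm.eq_nil
      subst hheap
      rw [altLoop_none n1 n2 nxt sums fuel (by rw [altBest_eq_minfold, hfold])]
      rfl
    · rcases heap with _ | ⟨⟨s, rI, cI⟩, tl⟩
      · exact absurd (hperm.mem_iff.mpr hmem) (List.not_mem_nil)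
      · obtain ⟨r, hrlen, hc, hmval⟩ := (mem_pvCands n1 n2 nxt m).mp hmem
        have hhd_mem : (s, rI, cI) ∈ pvCands n1 n2 nxt := hperm.mem_iff.mp List.mem_cons_self
        have hle1 : pvTle m (s, rI, cI) = true := hmin _ hhd_mem
        have hle2 : pvTle (s, rI, cI) m = true := by
          rcases List.mem_cons.mp (hperm.mem_iff.mpr hmem) with hEq | htl
          · rw [hEq]; exact pvTle_refl _
          · exact (List.pairwise_cons.mp hsort).1 m htl
        have hhd : (s, rI, cI) = m := pvTle_antisymm _ _ hle2 hle1
        set c : Int := PySem.List.pyGetD nxt (r : Int) 0 with hc_def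
        obtain ⟨hs, hrI, hcI⟩ : s = PySem.List.pyGetD n1 (r : Int) 0 + PySem.List.pyGetD n2 c 0 ∧
            rI = (r : Int) ∧ cI = c := by
          rw [hmval] at hhd
          simpa [pvCand, Prod.ext_iff] using hhd
        subst hs; subst hrI; subst hcI
        obtain ⟨hwf1, hwf2, hwf3⟩ := hwf
        have hc0le : 0 ≤ c := by rw [hc_def]; exact (hwf2 r hrlen).1
        have hrN1 : ((r : Nat) : Int) < (n1.length : Int) := by exact_mod_cast lt_of_lt_of_le hrlen hwf1
        -- one step on B's side
        have hfold' : (pvCands n1 n2 nxt).foldl pvMinStep none =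
            some (PySem.List.pyGetD n1 (r : Int) 0 + PySem.List.pyGetD n2 c 0, (r : Int), c) := by
          rw [hfold, hmval]; rfl
        rw [altLoop_step n1 n2 nxt sums fuel _ _ _ (by rw [altBest_eq_minfold, hfold'])]
        -- one step on A's side (definitional)
        show kspsLoop n1 n2 fuel
          (if c = 0 then
            kspsPush n1 n2 (kspsPush n1 n2 tl (r : Int) (c + 1)) ((r : Int) + 1) c
           else kspsPush n1 n2 tl (r : Int) (c + 1))
          (sums ++ [PySem.List.pyGetD n1 (r : Int) 0 + PySem.List.pyGetD n2 c 0]) = _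
        -- the surviving heap tail
        have htl_perm : tl.Perm ((pvCands n1 n2 nxt).erase (pvCand n1 n2 r c)) := by
          have h' := hperm.erase (pvCand n1 n2 r c)
          rwa [show ((PySem.List.pyGetD n1 (r : Int) 0 + PySem.List.pyGetD n2 c 0, (r : Int), c) :: tl).erase
              (pvCand n1 n2 r c) = tl from List.erase_cons_head _ _] at h'
        have htl_sort : tl.Pairwise (fun a b => pvTle a b = true) := (List.pairwise_cons.mp hsort).2
        -- pushing (r, c+1)
        have hguard1 : (if ((r : Nat) : Int) < (n1.length : Int) ∧ c + 1 < (n2.length : Int) then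
            [(PySem.List.pyGetD n1 (r : Int) 0 + PySem.List.pyGetD n2 (c + 1) 0, (r : Int), c + 1)] else []) =
            (if c + 1 < (n2.length : Int) then [pvCand n1 n2 r (c + 1)] else []) := by
          by_cases hb : c + 1 < (n2.length : Int) <;> simp [hb, hrN1, pvCand]
        have hperm1 : (kspsPush n1 n2 tl (r : Int) (c + 1)).Perm
            (pvCands n1 n2 (PySem.List.pySetD nxt (r : Int) (c + 1))) := by
          refine (kspsPush_perm n1 n2 tl (r : Int) (c + 1)).trans ?_
          rw [hguard1]
          refine ((htl_perm.append_left _).trans ?_)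
          exact (pvCands_update n1 n2 nxt r hrlen (hc_def ▸ hc)).symm
        have hsort1 : (kspsPush n1 n2 tl (r : Int) (c + 1)).Pairwise (fun a b => pvTle a b = true) :=
          kspsPush_pairwise n1 n2 tl _ _ htl_sort
        have hwf1' : pvWF n1 n2 (PySem.List.pySetD nxt (r : Int) (c + 1)) :=
          pvWF_step n1 n2 nxt r hrlen ⟨hwf1, hwf2, hwf3⟩ (hc_def ▸ hc)
        by_cases hc0 : c = 0
        · -- row r is exhausted at column 0: its first pop, possibly activating row r+1
          have hN2pos : (0 : Int) < (n2.length : Int) := by omega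
          have hrlast : r + 1 = nxt.length := by
            by_contra h
            have h' : r + 1 < nxt.length := by omega
            have := hwf3 r h'
            omega
          rw [if_pos hc0]
          by_cases hb : r + 1 < n1.length
          · have hbI : ((r : Nat) : Int) + 1 < (n1.length : Int) := by exact_mod_cast hb
            rw [if_pos ⟨hc0, hbI⟩]
            have hcastr : ((r : Nat) : Int) + 1 = (((r + 1 : Nat)) : Int) := by omega
            have hperm2 : (kspsPush n1 n2 (kspsPush n1 n2 tl (r : Int) (c + 1)) ((r : Int) + 1) c).Perm
                (pvCands n1 n2 (PySem.List.pySetD nxt (r : Int) (c + 1) ++ [0])) := by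
              rw [hc0, hcastr]
              refine (kspsPush_perm n1 n2 _ _ _).trans ?_
              rw [if_pos ⟨by exact_mod_cast hb, hN2pos⟩]
              rw [pvCands_append n1 n2 _ (by omega)]
              rw [PySem.List.length_pySetD]
              rw [← hrlast]
              refine List.Perm.trans ?_ List.perm_append_comm
              exact (hc0 ▸ hperm1).append_left [pvCand n1 n2 (r + 1) 0]
            have hsort2 : (kspsPush n1 n2 (kspsPush n1 n2 tl (r : Int) (c + 1)) ((r : Int) + 1) c).Pairwise
                (fun a b => pvTle a b = true) := kspsPush_pairwise n1 n2 _ _ _ hsort1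
            refine ih _ _ _ hperm2 hsort2 ?_
            obtain ⟨hw1, hw2, hw3⟩ := hwf1'
            have hlen' : (PySem.List.pySetD nxt (r : Int) (c + 1)).length = nxt.length :=
              PySem.List.length_pySetD nxt _ _
            refine ⟨by rw [List.length_append, hlen']; simp only [List.length_singleton]; omega, ?_, ?_⟩
            · intro i hi
              simp only [List.length_append, List.length_singleton, hlen'] at hi
              rcases Nat.lt_or_ge i (PySem.List.pySetD nxt (r : Int) (c + 1)).length with h' | h'
              · rw [pyGetD_append_lt _ _ _ h']
                exact hw2 i h'
              · have : i = nxt.length := by omega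
                rw [this, ← hlen', pyGetD_append_last]
                omega
            · intro i hi
              simp only [List.length_append, List.length_singleton, hlen'] at hi
              have h' : i < (PySem.List.pySetD nxt (r : Int) (c + 1)).length := by omega
              rw [pyGetD_append_lt _ _ _ h']
              rcases Nat.lt_or_ge (i + 1) nxt.length with h'' | h''
              · exact hw3 i (by omega)
              · have : i = r := by omega
                rw [this]
                have := PySem.List.pyGetD_pySetD_natCast nxt r r (c + 1) 0 hrlen
                rw [this, if_pos rfl]
                omega
          · have hbI : ¬ (((r : Nat) : Int) + 1 < (n1.length : Int)) := by
              intro h; exact hb (by exact_mod_cast h)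
            rw [if_neg (by rintro ⟨-, h⟩; exact hbI h)]
            have hperm2 : (kspsPush n1 n2 (kspsPush n1 n2 tl (r : Int) (c + 1)) ((r : Int) + 1) c).Perm
                (pvCands n1 n2 (PySem.List.pySetD nxt (r : Int) (c + 1))) := by
              refine (kspsPush_perm n1 n2 _ _ _).trans ?_
              rw [if_neg (by rintro ⟨h, -⟩; exact hbI h)]
              exact hperm1
            exact ih _ _ _ hperm2 (kspsPush_pairwise n1 n2 _ _ _ hsort1) hwf1'
        · rw [if_neg hc0, if_neg (by rintro ⟨h, -⟩; exact hc0 h)]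
          exact ih _ _ _ hperm1 hsort1 hwf1'

theorem ksps_eq_altKsps (n1 n2 : List Int) (k : Int) :
    kSmallestPairSums n1 n2 k = altKsps n1 n2 k := by
  unfold kSmallestPairSums altKsps
  by_cases h01 : n1 = [] ∨ n2 = []
  · rw [if_pos h01]
    have hheap : kspsPush n1 n2 [] 0 0 = [] := by
      unfold kspsPush
      rw [if_neg]
      rintro ⟨ha, hb⟩
      rcases h01 with h | h <;> (subst h; simp at ha hb)
    rw [hheap]
    cases k.toNat with
    | zero => rfl
    | succ m => rfl
  · push Not at h01
    obtain ⟨h1ne, h2ne⟩ := h01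
    rw [if_neg (by simp [h1ne, h2ne])]
    have hN1 : 0 < n1.length := List.length_pos_iff.mpr h1ne
    have hN2 : 0 < n2.length := List.length_pos_iff.mpr h2ne
    have hheap : kspsPush n1 n2 [] 0 0 =
        [(PySem.List.pyGetD n1 0 0 + PySem.List.pyGetD n2 0 0, 0, 0)] := by
      unfold kspsPush
      rw [if_pos ⟨by exact_mod_cast hN1, by exact_mod_cast hN2⟩]
      rfl
    rw [hheap]
    apply loops_eq
    · have hcands : pvCands n1 n2 [0] = [pvCand n1 n2 0 0] := by
        unfold pvCands pvCgen
        rw [show ([(0 : Int)] : List Int).length = 1 from rfl, List.range_one,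
          List.filterMap_cons, List.filterMap_nil]
        rw [show PySem.List.pyGetD [(0 : Int)] ((0 : Nat) : Int) 0 = 0 from rfl]
        rw [if_pos (by exact_mod_cast hN2 : (0 : Int) < (n2.length : Int))]
      rw [hcands]
      rw [show pvCand n1 n2 0 0 =
        (PySem.List.pyGetD n1 0 0 + PySem.List.pyGetD n2 0 0, 0, 0) from rfl]
    · simp
    · refine ⟨by simpa using hN1, ?_, ?_⟩
      · intro i hi
        have : i = 0 := by simpa using hi
        subst this
        rw [show PySem.List.pyGetD [(0 : Int)] ((0 : Nat) : Int) 0 = 0 from rfl]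
        omega
      · intro i hi
        simp at hi

-- ===== VERDICT (by name: the statement is the Claim_ definition above) =====
theorem kthSmallest_spec : Claim_equal_kthSmallest := by
  intro mat k _hdom _hpre
  unfold Spec_kthSmallest kthSmallest kthSmallest_alt
  have : ∀ (rows : List (List Int)) (seed : List Int),
      rows.foldl (fun ps row => kSmallestPairSums ps row k) seed =
        rows.foldl (fun ps row => altKsps ps row k) seed := by
    intro rows
    induction rows with
    | nil => intro seed; rfl
    | cons r rs ih =>
      intro seed
      simp only [List.foldl_cons]
      rw [ksps_eq_altKsps seed r k]
      exact ih _
  rw [this]
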